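-- pv_equiv track=rewrite | github.com/ryuzakidev/phBot-plugins | ItemCounter.py | sliceDict
-- ===== SOURCE A (Python) =====
-- def sliceDict(dict, start, length=0):
--     i = 0
--     temp = {}
--     for k in dict:
--         if i >= start and (length == 0 or i < start + length):
--             temp[k] = dict[k]
--         i += 1
--     return temp
-- ===== SOURCE B (Python) =====
-- def sliceDict(dict, start, length=0):
--     items = list(dict.items())
--     lo = max(start, 0)
--     hi = len(items) if length == 0 else max(start + length, 0)
--     return {k: v for k, v in items[lo:hi]}
-- ===== Notes on version B (the rewrite author's own statement) =====
-- stated objective: idiomatic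
-- what changed: B computes the slice bounds lo=max(start,0), hi=len or start+length up front and takes one contiguous items[lo:hi] slice, instead of A's per-element running counter with a membership test on every element; Pre_ requires distinct keys, which every real Python dict argument has, since a duplicate-key association list represents no dict.
import Mathlib
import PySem

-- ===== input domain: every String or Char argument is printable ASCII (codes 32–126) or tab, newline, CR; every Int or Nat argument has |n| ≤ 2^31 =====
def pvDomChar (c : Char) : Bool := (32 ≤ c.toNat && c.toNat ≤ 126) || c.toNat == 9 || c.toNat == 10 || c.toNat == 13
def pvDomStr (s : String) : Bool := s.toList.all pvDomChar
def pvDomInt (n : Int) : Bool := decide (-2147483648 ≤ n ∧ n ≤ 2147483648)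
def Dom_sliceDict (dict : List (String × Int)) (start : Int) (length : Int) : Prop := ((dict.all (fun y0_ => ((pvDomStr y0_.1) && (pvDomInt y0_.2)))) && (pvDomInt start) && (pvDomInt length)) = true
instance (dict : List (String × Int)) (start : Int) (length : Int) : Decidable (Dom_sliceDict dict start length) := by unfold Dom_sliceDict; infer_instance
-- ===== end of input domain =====

-- B computes the window bounds up front and takes one contiguous slice of the items,
-- instead of A's per-element counter test; objective: simpler/idiomatic, not faster.

-- ===== PORT A =====
-- i = 0; temp = {}; for k in dict: if i >= start and (length == 0 or i < start + length): temp[k] = dict[k]; i += 1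
def sliceDict (dict : List (String × Int)) (start : Int) (length : Int) : List (String × Int) :=
  ((dict.foldl (fun (st : PySem.Dict String Int × Int) kv =>
      (if st.2 ≥ start ∧ (length = 0 ∨ st.2 < start + length)
        then st.1.insert kv.1 (((PySem.Dict.mk dict).get? kv.1).getD 0)   -- dict[k]; k always present
        else st.1, st.2 + 1))
    (PySem.Dict.empty, (0 : Int))).1).items

-- ===== PORT B =====
-- items = list(dict.items()); lo = max(start, 0); hi = len(items) if length == 0 else max(start+length, 0)
-- return {k: v for k, v in items[lo:hi]}
def sliceDict_alt (dict : List (String × Int)) (start : Int) (length : Int) : List (String × Int) :=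
  ((PySem.List.slice dict (some (max start 0))
      (some (if length = 0 then (dict.length : Int) else max (start + length) 0))).foldl
      (fun (d : PySem.Dict String Int) kv => d.insert kv.1 kv.2) PySem.Dict.empty).items

-- ===== PRECONDITION & SPEC =====
-- Pre_ requires distinct keys: the Python argument is a dict, whose keys are necessarily
-- distinct, so duplicate-key association lists do not represent any Python input.
def Pre_sliceDict (dict : List (String × Int)) (start : Int) (length : Int) : Prop :=
  (dict.map Prod.fst).Nodup
instance (dict : List (String × Int)) (start : Int) (length : Int) : Decidable (Pre_sliceDict dict start length) := by unfold Pre_sliceDict; infer_instance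
def pvWitness_sliceDict : (List (String × Int)) × Int × Int := ([("a", 1), ("b", 2), ("c", 3)], 1, 1)

def Spec_sliceDict (dict : List (String × Int)) (start : Int) (length : Int) (out : List (String × Int)) : Prop := out = sliceDict_alt dict start length
instance (dict : List (String × Int)) (start : Int) (length : Int) (out : List (String × Int)) : Decidable (Spec_sliceDict dict start length out) := by unfold Spec_sliceDict; infer_instance

-- ===== CLAIM (what is proved, stated in full; the proofs are below) =====
def Claim_equal_sliceDict : Prop := ∀ (dict : List (String × Int)) (start : Int) (length : Int), Dom_sliceDict dict start length → Pre_sliceDict dict start length → Spec_sliceDict dict start length (sliceDict dict start length)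

-- ===== LEMMAS AND PROOFS =====

-- A's counter loop, when the test agrees with the window [a, b) on all indices it can see,
-- folds exactly over the corresponding contiguous segment of the list.
lemma foldA_window (start length : Int) (f : String → Int) (a b : Nat) :
    ∀ (xs : List (String × Int)) (i : Nat) (d : PySem.Dict String Int),
    (∀ j : Nat, j < i + xs.length →
      (((j : Int) ≥ start ∧ (length = 0 ∨ (j : Int) < start + length)) ↔ (a ≤ j ∧ j < b))) →
    (xs.foldl (fun (st : PySem.Dict String Int × Int) kv =>
        (if st.2 ≥ start ∧ (length = 0 ∨ st.2 < start + length)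
          then st.1.insert kv.1 (f kv.1) else st.1, st.2 + 1)) (d, (i : Int))).1
      = ((xs.drop (a - i)).take (b - max a i)).foldl
          (fun (d : PySem.Dict String Int) kv => d.insert kv.1 (f kv.1)) d := by
  intro xs
  induction xs with
  | nil => intro i d _; simp
  | cons x rest ih =>
    intro i d hc
    have hcast : ((i : Int) + 1) = ((i + 1 : Nat) : Int) := by push_cast; ring
    have hci := hc i (by simp)
    by_cases hin : a ≤ i ∧ i < b
    · simp only [List.foldl_cons]
      rw [if_pos (hci.mpr hin), hcast,
          ih (i + 1) _ (fun j hj => hc j (by simp only [List.length_cons]; omega))]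
      have h1 : a - i = 0 := by omega
      have h2 : max a i = i := by omega
      have h3 : b - i = (b - (i + 1)) + 1 := by omega
      have h4 : max a (i + 1) = i + 1 := by omega
      have h5 : a - (i + 1) = 0 := by omega
      rw [h1, h2, h3, h4, h5]
      simp [List.take_succ_cons]
    · simp only [List.foldl_cons]
      rw [if_neg (fun h => hin (hci.mp h)), hcast,
          ih (i + 1) _ (fun j hj => hc j (by simp only [List.length_cons]; omega))]
      by_cases hlt : i < a
      · have h1 : a - i = (a - (i + 1)) + 1 := by omega
        have h2 : max a i = max a (i + 1) := by omega
        rw [h1, h2, List.drop_succ_cons]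
      · have h1 : b - max a i = 0 := by omega
        have h2 : b - max a (i + 1) = 0 := by omega
        rw [h1, h2, List.take_zero, List.take_zero]

-- when keys are distinct, the first-match lookup dict[k] returns the pair's own value
lemma lookup_mem (dict : List (String × Int)) (hnd : (dict.map Prod.fst).Nodup)
    (kv : String × Int) (hmem : kv ∈ dict) :
    ((PySem.Dict.mk dict).get? kv.1).getD 0 = kv.2 := by
  have hk : (PySem.Dict.mk dict).keys.Nodup := by
    simpa [PySem.Dict.keys] using hnd
  have := PySem.Dict.get?_of_mem_items (d := PySem.Dict.mk dict) (k := kv.1) (v := kv.2)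
    (by simpa using hmem) hk
  simp [this]

theorem sliceDict_eq (dict : List (String × Int)) (start length : Int)
    (hnd : (dict.map Prod.fst).Nodup) :
    sliceDict dict start length = sliceDict_alt dict start length := by
  simp only [sliceDict, sliceDict_alt]
  set f : String → Int := fun k => ((PySem.Dict.mk dict).get? k).getD 0
  by_cases hl : length = 0
  · have hc : ∀ j : Nat, j < 0 + dict.length →
        (((j : Int) ≥ start ∧ (length = 0 ∨ (j : Int) < start + length)) ↔
          (start.toNat ≤ j ∧ j < dict.length)) := by
      intro j hj; omega
    have hA := foldA_window start length f start.toNat dict.length dict 0 PySem.Dict.empty hc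
    simp only [Nat.cast_zero] at hA
    rw [hA]
    have hlo : (0 : Int) ≤ max start 0 := by omega
    have hhi : (0 : Int) ≤ (if length = 0 then (dict.length : Int) else max (start + length) 0) := by
      split
      · exact Int.natCast_nonneg _
      · omega
    rw [PySem.List.slice_toNat _ hlo hhi]
    have e1 : (max start 0).toNat = start.toNat := by omega
    have e2 : (if length = 0 then (dict.length : Int) else max (start + length) 0).toNat
        = dict.length := by simp [hl]
    rw [e1, e2, Nat.sub_zero, Nat.max_zero]
    congr 1
    apply PySem.List.foldl_congr_mem'
    intro kv hmem d
    have : kv ∈ dict := (List.drop_sublist _ _).subset ((List.take_sublist _ _).subset hmem)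
    show d.insert kv.1 (((PySem.Dict.mk dict).get? kv.1).getD 0) = d.insert kv.1 kv.2
    rw [lookup_mem dict hnd kv this]
  · have hc : ∀ j : Nat, j < 0 + dict.length →
        (((j : Int) ≥ start ∧ (length = 0 ∨ (j : Int) < start + length)) ↔
          (start.toNat ≤ j ∧ j < (start + length).toNat)) := by
      intro j hj; omega
    have hA := foldA_window start length f start.toNat (start + length).toNat dict 0 PySem.Dict.empty hc
    simp only [Nat.cast_zero] at hA
    rw [hA]
    have hlo : (0 : Int) ≤ max start 0 := by omega
    have hhi : (0 : Int) ≤ (if length = 0 then (dict.length : Int) else max (start + length) 0) := by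
      split
      · exact Int.natCast_nonneg _
      · omega
    rw [PySem.List.slice_toNat _ hlo hhi]
    have e1 : (max start 0).toNat = start.toNat := by omega
    have e2 : (if length = 0 then (dict.length : Int) else max (start + length) 0).toNat
        = (start + length).toNat := by simp [hl]; omega
    rw [e1, e2, Nat.sub_zero, Nat.max_zero]
    congr 1
    apply PySem.List.foldl_congr_mem'
    intro kv hmem d
    have : kv ∈ dict := (List.drop_sublist _ _).subset ((List.take_sublist _ _).subset hmem)
    show d.insert kv.1 (((PySem.Dict.mk dict).get? kv.1).getD 0) = d.insert kv.1 kv.2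
    rw [lookup_mem dict hnd kv this]

-- ===== VERDICT (by name: the statement is the Claim_ definition above) =====
theorem sliceDict_spec : Claim_equal_sliceDict := by
  intro dict start length _ hpre
  unfold Spec_sliceDict
  exact sliceDict_eq dict start length hpre
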